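-- pv_equiv track=rewrite | github.com/javadebadi/django-blog | blog/logic.py | find_tag
-- ===== SOURCE A (Python) =====
-- def find_tag(string):
--     for i in range(6, 0, -1):
--         if string.startswith('#'*i):
--             return 'h' + str(i)
--     if string.startswith('>>>'):
--         return 'blockquote'
--     else:
--         return 'p'
-- ===== SOURCE B (Python) =====
-- def find_tag(string):
--     n = 0
--     while n < len(string) and string[n] == '#':
--         n += 1
--     if n:
--         return 'h' + str(min(n, 6))
--     return 'blockquote' if string.startswith('>>>') else 'p'
-- ===== Notes on version B (the rewrite author's own statement) =====
-- stated objective: simpler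
-- what changed: B counts the leading hash characters once and clamps the count at six, instead of A's six descending startswith prefix probes.
import Mathlib
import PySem

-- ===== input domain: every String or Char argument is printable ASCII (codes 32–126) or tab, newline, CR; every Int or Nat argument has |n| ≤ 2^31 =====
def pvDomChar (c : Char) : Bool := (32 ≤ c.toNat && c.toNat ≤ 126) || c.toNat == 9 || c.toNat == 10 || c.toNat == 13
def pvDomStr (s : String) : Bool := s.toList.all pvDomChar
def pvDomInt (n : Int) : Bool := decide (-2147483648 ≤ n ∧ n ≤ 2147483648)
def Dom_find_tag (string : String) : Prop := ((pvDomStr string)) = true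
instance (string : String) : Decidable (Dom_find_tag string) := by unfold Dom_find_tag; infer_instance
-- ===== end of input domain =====

-- B counts the leading '#' characters once and clamps with min(n,6) instead of probing six descending prefixes; simpler, same result.

-- ===== PORT A =====
def find_tag (string : String) : String :=
  match (PySem.List.pyRange 6 0 (-1)).findSome? (fun i =>
      if PySem.Str.startswith string (String.ofList (List.replicate i.toNat '#')) then
        some ("h" ++ PySem.Int.toStr i)
      else none) with
  | some r => r
  | none => if PySem.Str.startswith string ">>>" then "blockquote" else "p"

-- ===== PORT B =====
-- the while loop counting leading '#' characters
def countHash : List Char → Nat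
  | [] => 0
  | c :: rest => if c = '#' then countHash rest + 1 else 0

def find_tag_alt (string : String) : String :=
  let n := countHash string.toList
  if n ≠ 0 then "h" ++ PySem.Int.toStr (min (n : Int) 6)
  else if PySem.Str.startswith string ">>>" then "blockquote" else "p"

-- ===== PRECONDITION & SPEC =====
def Spec_find_tag (string : String) (out : String) : Prop := out = find_tag_alt string
instance (string : String) (out : String) : Decidable (Spec_find_tag string out) := by unfold Spec_find_tag; infer_instance

-- ===== CLAIM (what is proved, stated in full; the proofs are below) =====
def Claim_equal_find_tag : Prop := ∀ (string : String), Dom_find_tag string → Spec_find_tag string (find_tag string)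

-- ===== LEMMAS AND PROOFS =====

theorem replicate_hash_prefix_iff (i : Nat) (l : List Char) :
    List.replicate i '#' <+: l ↔ i ≤ countHash l := by
  induction i generalizing l with
  | zero => simp
  | succ i ih =>
    cases l with
    | nil => simp [countHash, List.replicate_succ]
    | cons c rest =>
      simp only [List.replicate_succ, List.cons_prefix_cons, countHash]
      by_cases hc : c = '#'
      · simp [hc, ih]
      · simp [hc, Ne.symm hc]

theorem startswith_hash (string : String) (i : Nat) :
    PySem.Str.startswith string (String.ofList (List.replicate i '#'))
      = decide (i ≤ countHash string.toList) := by
  rw [PySem.Str.startswith_eq, String.toList_ofList, Bool.eq_iff_iff]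
  simp [PySem.Chars.startswith_iff, replicate_hash_prefix_iff]

-- ===== VERDICT (by name: the statement is the Claim_ definition above) =====
theorem find_tag_spec : Claim_equal_find_tag := by
  intro string _
  unfold Spec_find_tag find_tag find_tag_alt
  rw [show PySem.List.pyRange 6 0 (-1) = [6, 5, 4, 3, 2, 1] from by decide]
  simp only [List.findSome?, startswith_hash,
    show ((6 : Int).toNat) = 6 from rfl, show ((5 : Int).toNat) = 5 from rfl,
    show ((4 : Int).toNat) = 4 from rfl, show ((3 : Int).toNat) = 3 from rfl,
    show ((2 : Int).toNat) = 2 from rfl, show ((1 : Int).toNat) = 1 from rfl]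
  generalize countHash string.toList = n
  rcases Nat.lt_or_ge n 6 with h6 | h6
  · interval_cases n <;> simp
  · simp [h6, show n ≠ 0 from by omega]
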